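-- pv_equiv track=rewrite | github.com/Sozbad/ecorank-scraper | scraper.py | assign_disposal_advice
-- ===== SOURCE A (Python) =====
-- def assign_disposal_advice(hazard_codes):
--     if not hazard_codes:
--         return "not found"
--     if any(code.startswith("H2") for code in hazard_codes):
--         return "Do not dispose in household waste. Take to a hazardous waste collection point or consult your council for flammable product disposal."
--     elif any(code.startswith("H3") for code in hazard_codes):
--         return "Use appropriate PPE and dispose through a licensed chemical waste provider."
--     elif any(code.startswith("H4") for code in hazard_codes):
--         return "Hazardous to aquatic life. Do not pour into drains. Use a chemical collection site."
--     else: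
--         return "Dispose of contents and container in general waste only if permitted by local guidelines."
-- ===== SOURCE B (Python) =====
-- def assign_disposal_advice(hazard_codes):
--     if not hazard_codes:
--         return "not found"
--     severity = {"H2": 0, "H3": 1, "H4": 2}
--     advice = [
--         "Do not dispose in household waste. Take to a hazardous waste collection point or consult your council for flammable product disposal.",
--         "Use appropriate PPE and dispose through a licensed chemical waste provider.",
--         "Hazardous to aquatic life. Do not pour into drains. Use a chemical collection site.",
--         "Dispose of contents and container in general waste only if permitted by local guidelines.",
--     ]
--     best = 3
--     for code in hazard_codes:
--         r = severity.get(code[:2], 3)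
--         if r < best:
--             best = r
--         if best == 0:
--             break
--     return advice[best]
-- ===== Notes on version B (the rewrite author's own statement) =====
-- stated objective: alternative
-- what changed: Replaces A's three staged any(startswith) scans and if/elif chain with a single min-severity reduction: one pass folds each code's two-character prefix through a severity table (with early exit at severity 0) and the final rank indexes an advice array.
import Mathlib
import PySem

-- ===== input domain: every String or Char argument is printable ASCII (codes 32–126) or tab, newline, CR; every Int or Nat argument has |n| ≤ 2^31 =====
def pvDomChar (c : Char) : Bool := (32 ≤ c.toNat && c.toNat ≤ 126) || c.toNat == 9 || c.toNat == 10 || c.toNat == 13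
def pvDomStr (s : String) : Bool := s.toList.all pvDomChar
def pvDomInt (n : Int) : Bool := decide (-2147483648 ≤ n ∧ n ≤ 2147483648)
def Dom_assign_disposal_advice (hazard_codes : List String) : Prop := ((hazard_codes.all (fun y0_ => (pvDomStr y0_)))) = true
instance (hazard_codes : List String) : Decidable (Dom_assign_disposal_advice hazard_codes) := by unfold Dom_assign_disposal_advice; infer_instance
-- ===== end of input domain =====

-- B replaces A's three staged any(startswith) scans with one min-severity fold over a
-- prefix→rank table (early exit at rank 0) whose result indexes an advice array (objective: alternative).

-- ===== PORT A =====
def assign_disposal_advice (hazard_codes : List String) : String :=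
  if hazard_codes = [] then "not found"
  else if hazard_codes.any (fun code => PySem.Str.startswith code "H2") then
    "Do not dispose in household waste. Take to a hazardous waste collection point or consult your council for flammable product disposal."
  else if hazard_codes.any (fun code => PySem.Str.startswith code "H3") then
    "Use appropriate PPE and dispose through a licensed chemical waste provider."
  else if hazard_codes.any (fun code => PySem.Str.startswith code "H4") then
    "Hazardous to aquatic life. Do not pour into drains. Use a chemical collection site."
  else
    "Dispose of contents and container in general waste only if permitted by local guidelines."

-- ===== PORT B =====
-- severity = {"H2": 0, "H3": 1, "H4": 2}
def pvSeverity : PySem.Dict String Nat :=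
  PySem.Dict.ofList [("H2", 0), ("H3", 1), ("H4", 2)]

-- the advice table, indexed by rank 0..3
def pvAdvice : List String :=
  [ "Do not dispose in household waste. Take to a hazardous waste collection point or consult your council for flammable product disposal."
  , "Use appropriate PPE and dispose through a licensed chemical waste provider."
  , "Hazardous to aquatic life. Do not pour into drains. Use a chemical collection site."
  , "Dispose of contents and container in general waste only if permitted by local guidelines." ]

-- r = severity.get(code[:2], 3)
def pvRank (code : String) : Nat :=
  PySem.Dict.getD pvSeverity (PySem.Str.slice code none (some 2)) 3

-- the for-loop with early break when best hits 0
def pvLoop : List String → Nat → Nat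
  | [], best => best
  | code :: rest, best =>
    let r := pvRank code
    let best' := min best r   -- 'if r < best: best = r'
    if best' = 0 then best' else pvLoop rest best'

def assign_disposal_advice_alt (hazard_codes : List String) : String :=
  if hazard_codes = [] then "not found"
  else pvAdvice.getD (pvLoop hazard_codes 3) ""  -- advice[best]; best < 4 always, so Python never raises

-- ===== PRECONDITION & SPEC =====
def Spec_assign_disposal_advice (hazard_codes : List String) (out : String) : Prop := out = assign_disposal_advice_alt hazard_codes
instance (hazard_codes : List String) (out : String) : Decidable (Spec_assign_disposal_advice hazard_codes out) := by unfold Spec_assign_disposal_advice; infer_instance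

-- ===== CLAIM (what is proved, stated in full; the proofs are below) =====
def Claim_equal_assign_disposal_advice : Prop := ∀ (hazard_codes : List String), Dom_assign_disposal_advice hazard_codes → Spec_assign_disposal_advice hazard_codes (assign_disposal_advice hazard_codes)

-- ===== LEMMAS AND PROOFS =====

-- s.startswith(p) for a 2-char p is the same test as s[:2] == p
theorem startswith_eq_slice_two (s : String) (p : String) (hp : p.toList.length = 2) :
    PySem.Str.startswith s p = true ↔ PySem.Str.slice s none (some 2) = p := by
  rw [show (PySem.Str.startswith s p = true) = (PySem.Chars.startswith s.toList p.toList = true) by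
        simp [pysem]]
  rw [PySem.Chars.startswith_iff, List.prefix_iff_eq_take, ← String.toList_inj]
  rw [show (PySem.Str.slice s none (some 2)).toList = s.toList.take 2 by simp [pysem]]
  rw [hp]
  exact eq_comm

-- pvRank as an explicit case split on the two-character prefix
theorem pvRank_eq (c : String) :
    pvRank c =
      if PySem.Str.slice c none (some 2) = "H2" then 0
      else if PySem.Str.slice c none (some 2) = "H3" then 1
      else if PySem.Str.slice c none (some 2) = "H4" then 2
      else 3 := by
  unfold pvRank
  rw [show pvSeverity = PySem.Dict.mk [("H2", 0), ("H3", 1), ("H4", 2)] by decide,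
      PySem.Dict.getD_eq_get?_getD]
  simp only [PySem.Dict.get?_mk_cons, beq_iff_eq]
  split_ifs <;> first | rfl | (exfalso; simp_all)

theorem pvRank_cases (c : String) : pvRank c = 0 ∨ pvRank c = 1 ∨ pvRank c = 2 ∨ pvRank c = 3 := by
  rw [pvRank_eq]; split_ifs <;> simp

theorem sw2 (c : String) : PySem.Str.startswith c "H2" = (pvRank c == 0) := by
  rw [Bool.eq_iff_iff, beq_iff_eq, startswith_eq_slice_two c "H2" (by decide), pvRank_eq]
  split_ifs <;> simp_all

theorem sw3 (c : String) : PySem.Str.startswith c "H3" = (pvRank c == 1) := by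
  rw [Bool.eq_iff_iff, beq_iff_eq, startswith_eq_slice_two c "H3" (by decide), pvRank_eq]
  split_ifs <;> simp_all

theorem sw4 (c : String) : PySem.Str.startswith c "H4" = (pvRank c == 2) := by
  rw [Bool.eq_iff_iff, beq_iff_eq, startswith_eq_slice_two c "H4" (by decide), pvRank_eq]
  split_ifs <;> simp_all

theorem foldr_le_three (xs : List String) : (xs.map pvRank).foldr min 3 ≤ 3 := by
  induction xs with
  | nil => simp
  | cons c rest ih => simp only [List.map, List.foldr]; omega

-- the min-fold, ignoring the early break
theorem pvLoop_min (xs : List String) : ∀ b, b ≤ 3 → pvLoop xs b = min b ((xs.map pvRank).foldr min 3) := by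
  induction xs with
  | nil => intro b hb; simp [pvLoop]; omega
  | cons c rest ih =>
    intro b hb
    have h3 := foldr_le_three rest
    simp only [pvLoop, List.map, List.foldr]
    by_cases h0 : min b (pvRank c) = 0
    · simp only [h0, if_true]; omega
    · rw [if_neg h0, ih _ (by omega)]; omega

-- the min over all ranks, as the first severity present
theorem foldr_char (xs : List String) :
    (xs.map pvRank).foldr min 3 =
      if xs.any (fun c => pvRank c == 0) then 0
      else if xs.any (fun c => pvRank c == 1) then 1
      else if xs.any (fun c => pvRank c == 2) then 2
      else 3 := by
  induction xs with
  | nil => simp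
  | cons c rest ih =>
    simp only [List.map, List.foldr, List.any_cons, ih]
    rcases pvRank_cases c with h | h | h | h <;>
      simp only [h] <;> norm_num <;> split_ifs <;> simp_all

theorem assign_disposal_advice_spec_aux (xs : List String) :
    assign_disposal_advice xs = assign_disposal_advice_alt xs := by
  unfold assign_disposal_advice assign_disposal_advice_alt
  by_cases h : xs = []
  · simp [h]
  · rw [if_neg h, if_neg h, pvLoop_min xs 3 (by omega), foldr_char]
    simp only [sw2, sw3, sw4]
    split_ifs <;> rfl

-- ===== VERDICT (by name: the statement is the Claim_ definition above) =====
theorem assign_disposal_advice_spec : Claim_equal_assign_disposal_advice := by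
  intro xs _
  exact assign_disposal_advice_spec_aux xs
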